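-- pv_equiv track=rewrite | github.com/KonradMarzec1991/Codewars-LeetCode | Codewars/Python/6kyu/6kyu_Split and then add both sides of an array together..py | split_and_add
-- ===== SOURCE A (Python) =====
-- def split_and_add(numbers, n):
--     from itertools import zip_longest
--     while n > 0:
--         if len(numbers) == 1:
--             return numbers
--         x, y = numbers[:len(numbers)//2], numbers[len(numbers)//2:]
--         nums = [i+j for i, j in zip_longest(x[::-1], y[::-1], fillvalue=0)]
--         numbers = nums[::-1]
--         n -= 1
--     return numbers
-- ===== SOURCE B (Python) =====
-- def split_and_add(numbers, n):
--     # Two-phase bucket algorithm: first plan the step sizes (lengths halve),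
--     # then route every original element through the index maps of all steps
--     # at once and accumulate it into its final bucket.  No intermediate
--     # summed lists are ever built.
--     m = len(numbers)
--     steps = []
--     while n > 0 and m > 1:
--         steps.append(m)
--         m = m - m // 2
--         n -= 1
--     result = [0] * m
--     for j, v in enumerate(numbers):
--         for ms in steps:
--             half = ms // 2
--             j = j + (ms - 2 * half) if j < half else j - half
--         result[j] += v
--     return result
-- ===== Notes on version B (the rewrite author's own statement) =====
-- stated objective: alternative
-- what changed: Instead of repeatedly building summed half-lists, B first plans the sequence of list lengths (one per fold step), then routes each original element through the composed index maps of all steps in one pass and accumulates it into its final bucket array.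
import Mathlib
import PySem

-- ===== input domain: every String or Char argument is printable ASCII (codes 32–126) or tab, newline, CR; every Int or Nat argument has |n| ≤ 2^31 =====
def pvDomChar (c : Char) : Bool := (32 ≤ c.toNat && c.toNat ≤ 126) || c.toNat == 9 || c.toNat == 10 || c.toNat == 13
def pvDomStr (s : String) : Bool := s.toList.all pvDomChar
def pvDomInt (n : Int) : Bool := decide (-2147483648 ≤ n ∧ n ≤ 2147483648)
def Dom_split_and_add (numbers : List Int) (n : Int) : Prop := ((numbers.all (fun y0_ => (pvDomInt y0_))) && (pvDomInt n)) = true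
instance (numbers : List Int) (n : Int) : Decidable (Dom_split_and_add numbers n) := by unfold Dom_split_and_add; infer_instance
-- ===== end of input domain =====

-- B replaces A's repeated building of summed half-lists by a two-phase bucket
-- algorithm: plan the step sizes first, then route every element through the
-- composed index maps into its final bucket (alternative decomposition).

-- ===== PORT A =====
-- zip_longest(xs, ys, fillvalue=0) combined with the elementwise '+' of the comprehension
def zipLongestAdd : List Int → List Int → List Int
  | [], [] => []
  | [], j :: ys => (0 + j) :: zipLongestAdd [] ys
  | i :: xs, [] => (i + 0) :: zipLongestAdd xs []
  | i :: xs, j :: ys => (i + j) :: zipLongestAdd xs ys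

def split_and_add (numbers : List Int) (n : Int) : List Int :=
  if _h : 0 < n then
    if numbers.length = 1 then numbers
    else
      let x := PySem.List.slice numbers none (some (PySem.Int.floordiv numbers.length 2))
      let y := PySem.List.slice numbers (some (PySem.Int.floordiv numbers.length 2)) none
      let nums := zipLongestAdd x.reverse y.reverse   -- x[::-1], y[::-1] are reversals
      split_and_add nums.reverse (n - 1)              -- nums[::-1]
  else numbers
termination_by n.toNat
decreasing_by omega

-- ===== PORT B =====
-- phase 1 of Source B: the while loop collecting the step sizes and the final length m
def planSteps (m n : Int) : List Int × Int :=
  if _h : 0 < n ∧ 1 < m then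
    let p := planSteps (m - PySem.Int.floordiv m 2) (n - 1)
    (m :: p.1, p.2)
  else ([], m)
termination_by n.toNat
decreasing_by omega

-- phase 2 of Source B: route each element through all index maps, accumulate into buckets
def split_and_add_alt (numbers : List Int) (n : Int) : List Int :=
  let p := planSteps (numbers.length : Int) n
  (PySem.List.enumerate numbers).foldl
    (fun res jv =>
      let k := p.1.foldl (fun j ms =>
        let half := PySem.Int.floordiv ms 2
        if j < half then j + (ms - 2 * half) else j - half) jv.1
      -- result[k] += v : here k is always a nonnegative in-range index
      res.modify k.toNat (· + jv.2))
    (List.replicate p.2.toNat 0)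

-- ===== PRECONDITION & SPEC =====
def Spec_split_and_add (numbers : List Int) (n : Int) (out : List Int) : Prop := out = split_and_add_alt numbers n
instance (numbers : List Int) (n : Int) (out : List Int) : Decidable (Spec_split_and_add numbers n out) := by unfold Spec_split_and_add; infer_instance

-- ===== CLAIM (what is proved, stated in full; the proofs are below) =====
def Claim_equal_split_and_add : Prop := ∀ (numbers : List Int) (n : Int), Dom_split_and_add numbers n → Spec_split_and_add numbers n (split_and_add numbers n)

-- ===== LEMMAS AND PROOFS =====

-- the right-aligned value of one fold step, and A's loop as a recursion on it
def pvStepF (l : List Int) : List Int :=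
  let x := l.take (l.length / 2)
  let y := l.drop (l.length / 2)
  y.take (y.length - x.length) ++ List.zipWith (· + ·) x (y.drop (y.length - x.length))

def pvIterA (l : List Int) (n : Int) : List Int :=
  if _h : 0 < n ∧ 1 < l.length then pvIterA (pvStepF l) (n - 1) else l
termination_by n.toNat
decreasing_by omega

theorem zipLongestAdd_nil_left (b : List Int) : zipLongestAdd [] b = b := by
  induction b with
  | nil => simp [zipLongestAdd]
  | cons j ys ih => simp [zipLongestAdd, ih]

theorem zipLongestAdd_eq (a b : List Int) (h : a.length ≤ b.length) :
    zipLongestAdd a b = List.zipWith (· + ·) a b ++ b.drop a.length := by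
  induction a generalizing b with
  | nil => simp [zipLongestAdd_nil_left]
  | cons i xs ih =>
    cases b with
    | nil => simp at h
    | cons j ys =>
      simp only [List.length_cons, Nat.add_le_add_iff_right] at h
      simp [zipLongestAdd, ih ys h]

theorem zipWith_app_right (f : Int → Int → Int) (l l' extra : List Int)
    (h : l.length = l'.length) :
    List.zipWith f l (l' ++ extra) = List.zipWith f l l' := by
  induction l generalizing l' with
  | nil => simp
  | cons i xs ih =>
    cases l' with
    | nil => simp at h
    | cons j ys =>
      simp only [List.length_cons, Nat.add_right_cancel_iff] at h
      simp [ih ys h]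

-- one loop step of A, written right-aligned
theorem step_eq (x y : List Int) (h : x.length ≤ y.length) :
    (zipLongestAdd x.reverse y.reverse).reverse =
      y.take (y.length - x.length) ++ List.zipWith (· + ·) x (y.drop (y.length - x.length)) := by
  have hy : y.reverse = (y.drop (y.length - x.length)).reverse ++ (y.take (y.length - x.length)).reverse := by
    rw [← List.reverse_append, List.take_append_drop]
  have hlen : x.reverse.length = (y.drop (y.length - x.length)).reverse.length := by
    simp; omega
  rw [zipLongestAdd_eq _ _ (by simp [h]), hy, zipWith_app_right _ _ _ _ hlen,
    List.drop_append_of_le_length (by simp; omega)]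
  have hx : x.reverse.length = x.length := by simp
  rw [hx, List.drop_reverse]
  have hz : (y.drop (y.length - x.length)).length - x.length = 0 := by simp; omega
  rw [hz]
  have hlen2 : x.length = (y.drop (y.length - x.length)).length := by simp; omega
  rw [← List.reverse_zipWith hlen2]
  simp

theorem split_and_add_nil (n : Int) : split_and_add [] n = [] := by
  by_cases h : 0 < n
  · rw [split_and_add]
    simp only [h, dite_true]
    simp only [List.length_nil]
    rw [if_neg (by omega)]
    simpa [PySem.List.slice, zipLongestAdd] using split_and_add_nil (n - 1)
  · rw [split_and_add]; simp [h]
termination_by n.toNat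
decreasing_by omega

theorem A_eq_iterA (numbers : List Int) (n : Int) :
    split_and_add numbers n = pvIterA numbers n := by
  by_cases hn : 0 < n
  · by_cases hl : 1 < numbers.length
    · have hfd : PySem.Int.floordiv (numbers.length : Int) 2 = ((numbers.length / 2 : Nat) : Int) := by
        exact_mod_cast PySem.Int.floordiv_natCast numbers.length 2
      set h2 := numbers.length / 2 with hh2
      have hx : PySem.List.slice numbers none (some (PySem.Int.floordiv (numbers.length : Int) 2)) = numbers.take h2 := by
        rw [hfd, PySem.List.slice_to_natCast]
      have hy : PySem.List.slice numbers (some (PySem.Int.floordiv (numbers.length : Int) 2)) none = numbers.drop h2 := by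
        rw [hfd, PySem.List.slice_from_natCast]
      have hle : (numbers.take h2).length ≤ (numbers.drop h2).length := by
        simp; omega
      rw [split_and_add, pvIterA]
      simp only [hn, dite_true, hl, and_true, if_neg (by omega : ¬ numbers.length = 1)]
      rw [hx, hy, step_eq _ _ hle]
      exact A_eq_iterA _ (n - 1)
    · rw [split_and_add, pvIterA]
      simp only [hn, dite_true]
      rw [dif_neg (by simp [hl])]
      by_cases h1 : numbers.length = 1
      · rw [if_pos h1]
      · have h0 : numbers = [] := by
          rw [← List.length_eq_zero_iff]; omega
        subst h0
        rw [if_neg (by simp)]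
        simpa [PySem.List.slice, zipLongestAdd] using split_and_add_nil (n - 1)
  · rw [split_and_add, pvIterA]
    simp [hn]
termination_by n.toNat
decreasing_by all_goals omega

-- scatter/accumulate machinery for B
def pvAddAt (res : List Int) (i : Nat) (v : Int) : List Int := res.modify i (· + v)
def pvScat (ps : List (Nat × Int)) (acc : List Int) : List Int :=
  ps.foldl (fun r p => pvAddAt r p.1 p.2) acc
def pvSumAt (k : Nat) (ps : List (Nat × Int)) : Int :=
  ((ps.filter (fun p => p.1 == k)).map (·.2)).sum
def pvPairs (F : Int → Int) (l : List Int) : List (Nat × Int) :=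
  (PySem.List.enumerate l).map (fun jv => ((F jv.1).toNat, jv.2))
def pvBody (j ms : Int) : Int :=
  let half := PySem.Int.floordiv ms 2
  if j < half then j + (ms - 2 * half) else j - half
def pvRoute (steps : List Int) (j : Int) : Int := steps.foldl pvBody j

theorem alt_eq_scat (l : List Int) (n : Int) :
    split_and_add_alt l n =
      pvScat (pvPairs (pvRoute (planSteps (l.length : Int) n).1) l)
        (List.replicate (planSteps (l.length : Int) n).2.toNat 0) := by
  simp only [split_and_add_alt, pvScat, pvPairs, pvAddAt, pvRoute, List.foldl_map]
  rfl

theorem pvSumAt_cons (k : Nat) (i : Nat) (v : Int) (ps : List (Nat × Int)) :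
    pvSumAt k ((i, v) :: ps) = (if i = k then v else 0) + pvSumAt k ps := by
  simp [pvSumAt, List.filter_cons]
  split_ifs with h <;> simp_all

theorem pvSumAt_append (k : Nat) (p q : List (Nat × Int)) :
    pvSumAt k (p ++ q) = pvSumAt k p + pvSumAt k q := by
  simp [pvSumAt, List.filter_append]

theorem pvScat_getElem? (ps : List (Nat × Int)) (acc : List Int) (k : Nat) :
    (pvScat ps acc)[k]? = acc[k]?.map (· + pvSumAt k ps) := by
  induction ps generalizing acc with
  | nil =>
    simp [pvScat, pvSumAt]
  | cons p ps ih =>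
    obtain ⟨i, v⟩ := p
    have : pvScat ((i, v) :: ps) acc = pvScat ps (pvAddAt acc i v) := rfl
    rw [this, ih, pvAddAt, List.getElem?_modify, pvSumAt_cons]
    cases h : acc[k]? with
    | none => simp
    | some a =>
      by_cases hik : i = k <;> simp [hik, add_assoc]

theorem pvScat_ext (p q : List (Nat × Int)) (acc : List Int)
    (h : ∀ k, pvSumAt k p = pvSumAt k q) : pvScat p acc = pvScat q acc := by
  apply List.ext_getElem?
  intro k
  rw [pvScat_getElem?, pvScat_getElem?, h k]

-- pvPairs over a shifted enumeration
theorem pvEnum_shift (xs : List Int) (s : Int) :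
    PySem.List.enumerate xs s = (PySem.List.enumerate xs 0).map (fun p => (p.1 + s, p.2)) := by
  induction xs generalizing s with
  | nil => rfl
  | cons c rest ih =>
    rw [PySem.List.enumerate_cons, PySem.List.enumerate_cons, List.map_cons, ih (s + 1)]
    simp only [zero_add]
    rw [ih 1, List.map_map]
    congr 1
    apply List.map_congr_left
    intro p _
    cases p with
    | mk a b =>
      simp only [Function.comp_apply, Prod.mk.injEq]
      exact ⟨by ring, trivial⟩

theorem pvPairs_shift (F : Int → Int) (xs : List Int) (s : Int) :
    (PySem.List.enumerate xs s).map (fun jv => ((F jv.1).toNat, jv.2)) =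
      pvPairs (fun j => F (j + s)) xs := by
  rw [pvEnum_shift, List.map_map, pvPairs]
  apply List.map_congr_left
  intro p _
  rfl

theorem pvPairs_cons (F : Int → Int) (c : Int) (rest : List Int) :
    pvPairs F (c :: rest) = ((F 0).toNat, c) :: pvPairs (fun j => F (j + 1)) rest := by
  rw [pvPairs, PySem.List.enumerate_cons, List.map_cons, pvPairs_shift]
  simp

theorem pvPairs_append (F : Int → Int) (a b : List Int) :
    pvPairs F (a ++ b) = pvPairs F a ++ pvPairs (fun j => F (j + (a.length : Int))) b := by
  rw [pvPairs, PySem.List.enumerate_append, List.map_append]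
  simp only [zero_add]
  rw [pvPairs_shift F b (a.length : Int)]
  rfl

theorem pvPairs_congr (F G : Int → Int) (l : List Int)
    (h : ∀ k : Nat, k < l.length → F k = G k) : pvPairs F l = pvPairs G l := by
  induction l generalizing F G with
  | nil => rfl
  | cons c rest ih =>
    rw [pvPairs_cons, pvPairs_cons]
    have h0 : F 0 = G 0 := by exact_mod_cast h 0 (by simp)
    rw [h0]
    congr 1
    apply ih
    intro k hk
    have := h (k + 1) (by simpa using Nat.succ_lt_succ hk)
    simpa [add_comm] using this

theorem pvSumAt_zipWith (F : Int → Int) (x y : List Int) (h : x.length = y.length) (k : Nat) :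
    pvSumAt k (pvPairs F (List.zipWith (· + ·) x y)) =
      pvSumAt k (pvPairs F x) + pvSumAt k (pvPairs F y) := by
  induction x generalizing y F with
  | nil =>
    cases y with
    | nil => simp [pvPairs, pvSumAt]
    | cons b ys => simp at h
  | cons a xs ih =>
    cases y with
    | nil => simp at h
    | cons b ys =>
      simp only [List.length_cons, Nat.add_right_cancel_iff] at h
      rw [List.zipWith_cons_cons, pvPairs_cons, pvPairs_cons, pvPairs_cons,
        pvSumAt_cons, pvSumAt_cons, pvSumAt_cons, ih _ _ h]
      split_ifs <;> ring

theorem pvSumAt_id (l : List Int) (s k : Nat) :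
    pvSumAt k (pvPairs (fun j => j + (s : Int)) l) =
      if s ≤ k then (l[k - s]?).getD 0 else 0 := by
  induction l generalizing s k with
  | nil => simp [pvPairs, pvSumAt]
  | cons c rest ih =>
    rw [pvPairs_cons]
    have hcast : ((0 : Int) + (s : Int)).toNat = s := by simp
    rw [hcast, pvSumAt_cons]
    have hfun : pvPairs (fun j => j + 1 + (s : Int)) rest
        = pvPairs (fun j => j + ((s + 1 : Nat) : Int)) rest := by
      apply pvPairs_congr
      intro k' _
      push_cast
      ring
    rw [hfun, ih]
    rcases Nat.lt_trichotomy k s with hk | hk | hk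
    · rw [if_neg (by omega), if_neg (by omega), if_neg (by omega)]
      simp
    · subst hk
      rw [if_pos (by omega), if_neg (by omega), if_pos (le_refl k)]
      simp
    · rw [if_neg (by omega), if_pos (by omega), if_pos (by omega)]
      have hks : k - s = (k - s - 1) + 1 := by omega
      rw [hks]
      have : k - (s + 1) = k - s - 1 := by omega
      rw [this]
      simp

theorem pvScat_id (l : List Int) :
    pvScat (pvPairs (fun j => j) l) (List.replicate l.length 0) = l := by
  apply List.ext_getElem?
  intro k
  rw [pvScat_getElem?]
  have hfun : pvPairs (fun j => j) l = pvPairs (fun j => j + ((0 : Nat) : Int)) l := by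
    apply pvPairs_congr; intro k' _; simp
  rw [hfun, pvSumAt_id]
  by_cases hk : k < l.length
  · rw [List.getElem?_replicate, if_pos hk, if_pos (Nat.zero_le k)]
    simp [List.getElem?_eq_getElem hk]
  · rw [List.getElem?_replicate, if_neg hk]
    have h1 : l[k]? = none := by rw [List.getElem?_eq_none_iff]; omega
    simp [h1]

-- the core exchange: routing one fold step then scattering equals scattering the folded list
theorem step_sum (F : Int → Int) (x y0 y1 : List Int) (m : Nat)
    (hm : m = x.length + y0.length + y1.length) (hy1 : y1.length = x.length)
    (hy0 : y0.length ≤ 1) (k : Nat) :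
    pvSumAt k (pvPairs (fun j => F (pvBody j (m : Int))) (x ++ (y0 ++ y1))) =
      pvSumAt k (pvPairs F (y0 ++ List.zipWith (· + ·) x y1)) := by
  have hfd : PySem.Int.floordiv (m : Int) 2 = ((m / 2 : Nat) : Int) := by
    exact_mod_cast PySem.Int.floordiv_natCast m 2
  have hhalf : m / 2 = x.length := by omega
  have hbody : ∀ j : Int, pvBody j (m : Int) =
      if j < (x.length : Int) then j + (y0.length : Int) else j - (x.length : Int) := by
    intro j
    rw [pvBody, hfd, hhalf]
    have : (m : Int) - 2 * (x.length : Int) = (y0.length : Int) := by omega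
    rw [this]
  rw [pvPairs_append, pvPairs_append, pvPairs_append]
  -- identify the three routed pieces
  have hx : pvPairs (fun j => F (pvBody j (m : Int))) x
      = pvPairs (fun j => F (j + (y0.length : Int))) x := by
    apply pvPairs_congr
    intro j hj
    rw [hbody]
    rw [if_pos (by exact_mod_cast hj)]
  have hy0' : pvPairs (fun j => F (pvBody (j + (x.length : Int)) (m : Int))) y0
      = pvPairs F y0 := by
    apply pvPairs_congr
    intro j _
    rw [hbody]
    rw [if_neg (by omega)]
    congr 1
    ring
  have hy1' : pvPairs (fun j => F (pvBody (j + (y0.length : Int) + (x.length : Int)) (m : Int))) y1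
      = pvPairs (fun j => F (j + (y0.length : Int))) y1 := by
    apply pvPairs_congr
    intro j _
    rw [hbody]
    rw [if_neg (by omega)]
    congr 1
    ring
  rw [hx, hy0', hy1']
  simp only [pvSumAt_append]
  rw [pvSumAt_zipWith _ _ _ hy1.symm]
  ring

-- the clean per-list form of the exchange
theorem stepF_length (l : List Int) : (pvStepF l).length = l.length - l.length / 2 := by
  simp [pvStepF]
  omega

theorem step_sum' (F : Int → Int) (l : List Int) (k : Nat) :
    pvSumAt k (pvPairs (fun j => F (pvBody j (l.length : Int))) l) =
      pvSumAt k (pvPairs F (pvStepF l)) := by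
  have hsplit : l.take (l.length / 2) ++
      ((l.drop (l.length / 2)).take ((l.drop (l.length / 2)).length - (l.take (l.length / 2)).length) ++
       (l.drop (l.length / 2)).drop ((l.drop (l.length / 2)).length - (l.take (l.length / 2)).length)) = l := by
    rw [List.take_append_drop, List.take_append_drop]
  conv_lhs => rw [← hsplit]
  exact step_sum F _ _ _ _ (by simp [Nat.min_eq_left (Nat.div_le_self _ _)]; omega)
    (by simp [Nat.min_eq_left (Nat.div_le_self _ _)]; omega)
    (by simp [Nat.min_eq_left (Nat.div_le_self _ _)]; omega) k

theorem B_eq_iterA (l : List Int) (n : Int) : split_and_add_alt l n = pvIterA l n := by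
  by_cases hc : 0 < n ∧ 1 < l.length
  · have hplan : planSteps (l.length : Int) n =
        ((l.length : Int) :: (planSteps ((l.length : Int) - PySem.Int.floordiv (l.length : Int) 2) (n - 1)).1,
         (planSteps ((l.length : Int) - PySem.Int.floordiv (l.length : Int) 2) (n - 1)).2) := by
      rw [planSteps, dif_pos ⟨hc.1, by exact_mod_cast hc.2⟩]
    have hsl : ((pvStepF l).length : Int) = (l.length : Int) - PySem.Int.floordiv (l.length : Int) 2 := by
      have hfd : PySem.Int.floordiv (l.length : Int) 2 = ((l.length / 2 : Nat) : Int) := by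
        exact_mod_cast PySem.Int.floordiv_natCast l.length 2
      rw [hfd, stepF_length, Nat.cast_sub (Nat.div_le_self _ _)]
    calc split_and_add_alt l n
        = pvScat (pvPairs (pvRoute (planSteps (l.length : Int) n).1) l)
            (List.replicate (planSteps (l.length : Int) n).2.toNat 0) := alt_eq_scat l n
      _ = pvScat (pvPairs (pvRoute (planSteps ((pvStepF l).length : Int) (n - 1)).1) (pvStepF l))
            (List.replicate (planSteps ((pvStepF l).length : Int) (n - 1)).2.toNat 0) := by
          rw [hsl, hplan]
          exact pvScat_ext _ _ _ (fun k =>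
            step_sum' (pvRoute (planSteps ((l.length : Int) - PySem.Int.floordiv (l.length : Int) 2) (n - 1)).1) l k)
      _ = split_and_add_alt (pvStepF l) (n - 1) := (alt_eq_scat _ _).symm
      _ = pvIterA (pvStepF l) (n - 1) := B_eq_iterA _ _
      _ = pvIterA l n := by
          conv_rhs => rw [pvIterA]
          rw [dif_pos hc]
  · have hplan : planSteps (l.length : Int) n = ([], (l.length : Int)) := by
      rw [planSteps, dif_neg]
      intro h
      exact hc ⟨h.1, by exact_mod_cast h.2⟩
    rw [alt_eq_scat, hplan]
    simp only [Int.toNat_natCast]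
    have hid : pvPairs (pvRoute []) l = pvPairs (fun j => j) l := rfl
    rw [hid, pvScat_id, pvIterA, dif_neg hc]
termination_by n.toNat
decreasing_by omega

-- ===== VERDICT (by name: the statement is the Claim_ definition above) =====
theorem split_and_add_spec : Claim_equal_split_and_add := by
  intro numbers n _
  unfold Spec_split_and_add
  rw [A_eq_iterA, B_eq_iterA]
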